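-- pv_equiv track=rewrite | github.com/zdavit/PortLens | src/network_map.py | _best_os_guess
-- ===== SOURCE A (Python) =====
-- _OS_FAMILY_KEYWORDS = ["Linux", "Windows", "macOS", "FreeBSD", "OpenBSD", "NetBSD", "iOS", "Android"]
--
-- def _best_os_guess(os_matches):
--     """Pick the best OS guess by aggregating matches into OS families.
--
--     If the top match has high confidence (>=90%), use it directly.
--     Otherwise, group matches by OS family and return the family with the
--     highest combined weight, along with the best specific match name.
--     """
--     best = os_matches[0]
--     best_acc = int(best.get("accuracy", 0))
--
--     if best_acc >= 90:
--         return f"{best.get('name', 'Unknown')} ({best_acc}%)"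
--
--     family_scores = {}
--     family_best = {}
--     for match in os_matches:
--         name = match.get("name", "")
--         acc = int(match.get("accuracy", 0))
--         family = "Other"
--         for kw in _OS_FAMILY_KEYWORDS:
--             if kw.lower() in name.lower():
--                 family = kw
--                 break
--         family_scores[family] = family_scores.get(family, 0) + acc
--         if family not in family_best or acc > int(family_best[family].get("accuracy", 0)):
--             family_best[family] = match
--
--     top_family = max(family_scores, key=family_scores.get)
--     top_match = family_best[top_family]
--     top_acc = int(top_match.get("accuracy", 0))
--     return f"{top_match.get('name', 'Unknown')} ({top_acc}%)"
-- ===== SOURCE B (Python) =====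
-- _OS_FAMILY_KEYWORDS = ["Linux", "Windows", "macOS", "FreeBSD", "OpenBSD", "NetBSD", "iOS", "Android"]
--
-- def _family_of(name):
--     low = name.lower()
--     for kw in _OS_FAMILY_KEYWORDS:
--         if kw.lower() in low:
--             return kw
--     return "Other"
--
-- def _best_os_guess(os_matches):
--     best = os_matches[0]
--     best_acc = int(best.get("accuracy", 0))
--     if best_acc >= 90:
--         return f"{best.get('name', 'Unknown')} ({best_acc}%)"
--
--     groups = {}
--     for match in os_matches:
--         fam = _family_of(match.get("name", ""))
--         groups[fam] = groups.get(fam, []) + [(int(match.get("accuracy", 0)), match)]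
--
--     top_total = None
--     top_family = None
--     for fam, entries in groups.items():
--         total = sum(acc for acc, _ in entries)
--         if top_total is None or total > top_total:
--             top_total, top_family = total, fam
--
--     top_acc, top_match = max(groups[top_family], key=lambda e: e[0])
--     return f"{top_match.get('name', 'Unknown')} ({top_acc}%)"
-- ===== Notes on version B (the rewrite author's own statement) =====
-- stated objective: alternative
-- what changed: B groups matches into a single family->entries dict in one pass and then derives each family's total score and best specific match from that grouping in a second pass, instead of A's single pass maintaining two parallel running dicts (scores and best-so-far).
import Mathlib
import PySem

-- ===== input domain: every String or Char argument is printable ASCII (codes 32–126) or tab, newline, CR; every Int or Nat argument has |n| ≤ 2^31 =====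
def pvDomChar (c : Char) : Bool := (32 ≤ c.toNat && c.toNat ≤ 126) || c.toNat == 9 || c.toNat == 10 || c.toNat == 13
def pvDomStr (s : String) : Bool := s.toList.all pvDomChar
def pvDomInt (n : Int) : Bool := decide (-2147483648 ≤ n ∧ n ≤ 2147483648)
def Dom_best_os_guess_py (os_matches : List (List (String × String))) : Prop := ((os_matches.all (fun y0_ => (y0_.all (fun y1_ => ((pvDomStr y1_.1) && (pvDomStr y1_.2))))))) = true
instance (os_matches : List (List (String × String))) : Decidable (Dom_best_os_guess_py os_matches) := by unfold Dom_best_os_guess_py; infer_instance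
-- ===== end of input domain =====

-- B re-derives each family's total and best match from one grouping dict built in a single pass,
-- instead of A's two parallel running dicts; equal return value proved on Pre_ (the non-raising inputs).

def pvOsFamilyKeywords : List String :=
  ["Linux", "Windows", "macOS", "FreeBSD", "OpenBSD", "NetBSD", "iOS", "Android"]

-- int(m.get("accuracy", 0)): none = ValueError (the default 0 is already an int)
def pvAcc? (m : List (String × String)) : Option Int :=
  match (PySem.Dict.mk m).get? "accuracy" with
  | some s => PySem.Int.ofStr? s
  | none => some 0

-- ===== PORT A =====
-- body of A's aggregation loop (updates family_scores, family_best)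
def pvStepA (st : PySem.Dict String Int × PySem.Dict String (List (String × String)))
    (m : List (String × String)) :
    PySem.Dict String Int × PySem.Dict String (List (String × String)) :=
  let name := (PySem.Dict.mk m).getD "name" ""
  let acc : Int := (pvAcc? m).getD 0
  let family := (pvOsFamilyKeywords.find? (fun kw =>
      PySem.Str.isIn (PySem.Str.lower kw) (PySem.Str.lower name))).getD "Other"
  let scores := st.1.insert family (st.1.getD family 0 + acc)
  let fbest :=
    if (!st.2.contains family) || decide ((match st.2.get? family with
        | some fb => (pvAcc? fb).getD 0
        | none => 0) < acc)
    then st.2.insert family m else st.2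
  (scores, fbest)

def best_os_guess_py (os_matches : List (List (String × String))) : String :=
  match os_matches with
  | [] => ""  -- os_matches[0] raises IndexError; excluded by Pre_
  | best :: _ =>
    let best_acc : Int := (pvAcc? best).getD 0   -- int() ValueError excluded by Pre_
    if 90 ≤ best_acc then
      ((PySem.Dict.mk best).getD "name" "Unknown") ++ " (" ++ PySem.Int.toStr best_acc ++ "%)"
    else
      let st := os_matches.foldl pvStepA (PySem.Dict.mk [], PySem.Dict.mk [])
      -- max(family_scores, key=family_scores.get): first key with maximal value (dict nonempty here)
      let top_family := (PySem.List.max? st.1.keys (fun f => st.1.getD f 0)).getD "Other"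
      let top_match := (st.2.get? top_family).getD []
      let top_acc : Int := (pvAcc? top_match).getD 0
      ((PySem.Dict.mk top_match).getD "name" "Unknown") ++ " (" ++ PySem.Int.toStr top_acc ++ "%)"

-- ===== PORT B =====
def pvFamilyOf (name : String) : String :=
  let low := PySem.Str.lower name
  match pvOsFamilyKeywords.find? (fun kw => PySem.Str.isIn (PySem.Str.lower kw) low) with
  | some kw => kw
  | none => "Other"

-- body of B's grouping loop: groups[fam] = groups.get(fam, []) + [(acc, match)]
def pvGroupStep (g : PySem.Dict String (List (Int × List (String × String))))
    (m : List (String × String)) : PySem.Dict String (List (Int × List (String × String))) :=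
  let fam := pvFamilyOf ((PySem.Dict.mk m).getD "name" "")
  g.insert fam (g.getD fam [] ++ [((pvAcc? m).getD 0, m)])

-- body of B's selection loop over groups.items()
def pvSelStep (st : Option (Int × String))
    (p : String × List (Int × List (String × String))) : Option (Int × String) :=
  let total := (p.2.map Prod.fst).sum
  match st with
  | none => some (total, p.1)
  | some (tt, tf) => if tt < total then some (total, p.1) else some (tt, tf)

def best_os_guess_py_alt (os_matches : List (List (String × String))) : String :=
  match os_matches with
  | [] => ""  -- IndexError; excluded by Pre_
  | best :: _ =>
    let best_acc : Int := (pvAcc? best).getD 0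
    if 90 ≤ best_acc then
      ((PySem.Dict.mk best).getD "name" "Unknown") ++ " (" ++ PySem.Int.toStr best_acc ++ "%)"
    else
      let groups := os_matches.foldl pvGroupStep (PySem.Dict.mk [])
      match groups.items.foldl pvSelStep none with
      | none => ""  -- unreachable: os_matches is nonempty
      | some (_, top_family) =>
        match PySem.List.max? (groups.getD top_family []) (fun e => e.1) with
        | none => ""  -- unreachable: every group is nonempty
        | some (top_acc, top_match) =>
          ((PySem.Dict.mk top_match).getD "name" "Unknown") ++ " (" ++ PySem.Int.toStr top_acc ++ "%)"

-- ===== PRECONDITION & SPEC =====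
-- Pre_ excludes exactly the inputs where the Python A raises: the empty list (IndexError on
-- os_matches[0]) and inputs whose evaluated "accuracy" strings do not parse as int (ValueError);
-- when the first match's accuracy is >= 90 the later accuracies are never evaluated.
def Pre_best_os_guess_py (os_matches : List (List (String × String))) : Prop :=
  os_matches ≠ [] ∧ (pvAcc? os_matches.headI).isSome = true ∧
    (90 ≤ (pvAcc? os_matches.headI).getD 0 ∨
      (os_matches.tail.all fun m => (pvAcc? m).isSome) = true)
instance (os_matches : List (List (String × String))) : Decidable (Pre_best_os_guess_py os_matches) := by
  unfold Pre_best_os_guess_py; infer_instance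

def pvWitness_best_os_guess_py : (List (List (String × String))) :=
  [[("name", "Ubuntu Linux 5.4"), ("accuracy", "85")],
   [("name", "Microsoft Windows 10"), ("accuracy", "80")],
   [("name", "Linux 4.15"), ("accuracy", "70")]]

def Spec_best_os_guess_py (os_matches : List (List (String × String))) (out : String) : Prop := out = best_os_guess_py_alt os_matches
instance (os_matches : List (List (String × String))) (out : String) : Decidable (Spec_best_os_guess_py os_matches out) := by unfold Spec_best_os_guess_py; infer_instance

-- ===== CLAIM (what is proved, stated in full; the proofs are below) =====
def Claim_equal_best_os_guess_py : Prop := ∀ (os_matches : List (List (String × String))), Dom_best_os_guess_py os_matches → Pre_best_os_guess_py os_matches → Spec_best_os_guess_py os_matches (best_os_guess_py os_matches)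

-- ===== LEMMAS AND PROOFS =====

def pvAccOf (m : List (String × String)) : Int := (pvAcc? m).getD 0
def pvSumE (l : List (Int × List (String × String))) : Int := (l.map Prod.fst).sum
def pvBest? (l : List (Int × List (String × String))) :
    Option (Int × List (String × String)) := PySem.List.max? l (fun e => e.1)
def pvBsel (l : List (Int × List (String × String))) : List (String × String) :=
  ((pvBest? l).getD (0, [])).2
def pvAbsS (g : PySem.Dict String (List (Int × List (String × String)))) :
    PySem.Dict String Int := PySem.Dict.mk (g.items.map (fun p => (p.1, pvSumE p.2)))
def pvAbsB (g : PySem.Dict String (List (Int × List (String × String)))) :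
    PySem.Dict String (List (String × String)) :=
  PySem.Dict.mk (g.items.map (fun p => (p.1, pvBsel p.2)))
def pvInv (g : PySem.Dict String (List (Int × List (String × String)))) : Prop :=
  g.keys.Nodup ∧ ∀ p ∈ g.items, p.2 ≠ [] ∧ ∀ e ∈ p.2, e.1 = pvAccOf e.2

theorem pvAbsS_items (g : PySem.Dict String (List (Int × List (String × String)))) :
    (pvAbsS g).items = g.items.map (fun p => (p.1, pvSumE p.2)) := rfl
theorem pvAbsB_items (g : PySem.Dict String (List (Int × List (String × String)))) :
    (pvAbsB g).items = g.items.map (fun p => (p.1, pvBsel p.2)) := rfl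
theorem pvAbsS_keys (g : PySem.Dict String (List (Int × List (String × String)))) :
    (pvAbsS g).keys = g.keys := by
  simp [pvAbsS, PySem.Dict.keys, List.map_map, Function.comp]
theorem pvDict_ext {κ ν : Type} (d e : PySem.Dict κ ν) (h : d.items = e.items) : d = e := by
  cases d; cases e; simpa [PySem.Dict.items] using h
theorem pvAbsS_contains (g : PySem.Dict String (List (Int × List (String × String)))) (k : String) :
    (pvAbsS g).contains k = g.contains k := by
  have hcomp : ((fun p : String × Int => p.1 == k) ∘ fun p : String × List (Int × List (String × String)) => (p.1, pvSumE p.2))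
      = fun p : String × List (Int × List (String × String)) => p.1 == k := rfl
  simp [pvAbsS, PySem.Dict.contains, List.any_map, hcomp]
theorem pvAbsS_get? (g : PySem.Dict String (List (Int × List (String × String)))) (k : String) :
    (pvAbsS g).get? k = (g.get? k).map pvSumE := by
  have hcomp : ((fun p : String × Int => p.1 == k) ∘ fun p : String × List (Int × List (String × String)) => (p.1, pvSumE p.2))
      = fun p : String × List (Int × List (String × String)) => p.1 == k := rfl
  have hcomp2 : ((fun x : String × Int => x.2) ∘ fun p : String × List (Int × List (String × String)) => (p.1, pvSumE p.2))
      = (pvSumE ∘ fun x : String × List (Int × List (String × String)) => x.2) := rfl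
  simp [pvAbsS, PySem.Dict.get?, List.find?_map, Option.map_map, hcomp, hcomp2]
theorem pvAbsB_contains (g : PySem.Dict String (List (Int × List (String × String)))) (k : String) :
    (pvAbsB g).contains k = g.contains k := by
  have hcomp : ((fun p : String × List (String × String) => p.1 == k) ∘ fun p : String × List (Int × List (String × String)) => (p.1, pvBsel p.2))
      = fun p : String × List (Int × List (String × String)) => p.1 == k := rfl
  simp [pvAbsB, PySem.Dict.contains, List.any_map, hcomp]
theorem pvAbsB_get? (g : PySem.Dict String (List (Int × List (String × String)))) (k : String) :
    (pvAbsB g).get? k = (g.get? k).map pvBsel := by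
  have hcomp : ((fun p : String × List (String × String) => p.1 == k) ∘ fun p : String × List (Int × List (String × String)) => (p.1, pvBsel p.2))
      = fun p : String × List (Int × List (String × String)) => p.1 == k := rfl
  have hcomp2 : ((fun x : String × List (String × String) => x.2) ∘ fun p : String × List (Int × List (String × String)) => (p.1, pvBsel p.2))
      = (pvBsel ∘ fun x : String × List (Int × List (String × String)) => x.2) := rfl
  simp [pvAbsB, PySem.Dict.get?, List.find?_map, Option.map_map, hcomp, hcomp2]
theorem pvSumE_append (l : List (Int × List (String × String))) (x : Int × List (String × String)) :
    pvSumE (l ++ [x]) = pvSumE l + x.1 := by simp [pvSumE]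
theorem pvBest?_append (l : List (Int × List (String × String)))
    (x b : Int × List (String × String)) (h : pvBest? l = some b) :
    pvBest? (l ++ [x]) = if b.1 < x.1 then some x else some b := by
  unfold pvBest? PySem.List.max? at h ⊢
  rw [List.foldl_append, h]
  simp [List.foldl]
theorem pvBest?_single (x : Int × List (String × String)) : pvBest? [x] = some x := by
  simp [pvBest?, PySem.List.max?]
theorem pvFamilyOf_eq (name : String) :
    pvFamilyOf name = (pvOsFamilyKeywords.find? (fun kw =>
      PySem.Str.isIn (PySem.Str.lower kw) (PySem.Str.lower name))).getD "Other" := by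
  show (match pvOsFamilyKeywords.find? (fun kw => PySem.Str.isIn (PySem.Str.lower kw) (PySem.Str.lower name)) with
    | some kw => kw
    | none => "Other") = _
  cases h : pvOsFamilyKeywords.find? (fun kw => PySem.Str.isIn (PySem.Str.lower kw) (PySem.Str.lower name)) <;> rfl

theorem pv_mem_of_get? (g : PySem.Dict String (List (Int × List (String × String))))
    {k : String} {l : List (Int × List (String × String))} (h : g.get? k = some l) :
    (k, l) ∈ g.items := by
  unfold PySem.Dict.get? at h
  obtain ⟨p, hp, hp2⟩ := Option.map_eq_some_iff.mp h
  have hpk : p.1 = k := by simpa using List.find?_some hp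
  have := List.mem_of_find?_eq_some hp
  have hpe : p = (k, l) := by cases p; simp_all
  rwa [hpe] at this

theorem pvStep_comm (g : PySem.Dict String (List (Int × List (String × String))))
    (m : List (String × String)) (h : pvInv g) :
    pvStepA (pvAbsS g, pvAbsB g) m = (pvAbsS (pvGroupStep g m), pvAbsB (pvGroupStep g m)) ∧
    pvInv (pvGroupStep g m) := by
  obtain ⟨hnd, hslot⟩ := h
  have hstepA : pvStepA (pvAbsS g, pvAbsB g) m =
      ((pvAbsS g).insert (pvFamilyOf ((PySem.Dict.mk m).getD "name" ""))
        ((pvAbsS g).getD (pvFamilyOf ((PySem.Dict.mk m).getD "name" "")) 0 + (pvAcc? m).getD 0),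
       if (!(pvAbsB g).contains (pvFamilyOf ((PySem.Dict.mk m).getD "name" ""))) ||
           decide ((match (pvAbsB g).get? (pvFamilyOf ((PySem.Dict.mk m).getD "name" "")) with
             | some fb => (pvAcc? fb).getD 0
             | none => 0) < (pvAcc? m).getD 0)
       then (pvAbsB g).insert (pvFamilyOf ((PySem.Dict.mk m).getD "name" "")) m else pvAbsB g) := by
    simp only [pvStepA, ← pvFamilyOf_eq]
  set f := pvFamilyOf ((PySem.Dict.mk m).getD "name" "") with hf
  set a := (pvAcc? m).getD 0 with ha
  have haOf : a = pvAccOf m := rfl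
  rw [hstepA]
  by_cases hc : g.contains f = true
  · -- existing family
    obtain ⟨l, hl⟩ : ∃ l, g.get? f = some l := by
      cases hgl : g.get? f with
      | none =>
        rw [PySem.Dict.get?_eq_none_iff_contains] at hgl
        rw [hc] at hgl; cases hgl
      | some l => exact ⟨l, rfl⟩
    have hmem : (f, l) ∈ g.items := pv_mem_of_get? g hl
    obtain ⟨hlne, hent⟩ := hslot _ hmem
    obtain ⟨b, hb⟩ : ∃ b, pvBest? l = some b := by
      cases hbb : pvBest? l with
      | none => exact absurd ((PySem.List.max?_eq_none_iff _ _).mp hbb) hlne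
      | some b => exact ⟨b, rfl⟩
    have hbmem : b ∈ l := PySem.List.max?_mem hb
    have hbacc : b.1 = pvAccOf b.2 := hent b hbmem
    have hgetD : g.getD f [] = l := by simp [PySem.Dict.getD, hl]
    have hg' : pvGroupStep g m = g.insert f (l ++ [(a, m)]) := by
      simp only [pvGroupStep, ← hf, ← ha, hgetD]
    have hitems' : (pvGroupStep g m).items =
        g.items.map (fun p => if p.1 == f then (f, l ++ [(a, m)]) else p) := by
      rw [hg']; simp [PySem.Dict.insert, hc]
    have huniq : ∀ p ∈ g.items, p.1 = f → p.2 = l := by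
      intro p hp hpf
      have := PySem.Dict.get?_of_mem_items g (k := p.1) (v := p.2)
        (by cases p; exact hp) hnd
      rw [hpf, hl] at this
      exact (Option.some.inj this).symm
    have hcond : ((!(pvAbsB g).contains f) ||
        decide ((match (pvAbsB g).get? f with
          | some fb => (pvAcc? fb).getD 0
          | none => 0) < a)) = decide (b.1 < a) := by
      have hbsel : pvBsel l = b.2 := by simp [pvBsel, hb]
      have hbacc' : (pvAcc? b.2).getD 0 = b.1 := hbacc.symm
      rw [pvAbsB_contains, hc, pvAbsB_get?, hl]
      simp only [Option.map_some, Bool.not_true, Bool.false_or, hbsel, hbacc']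
    refine ⟨?_, ?_⟩
    · rw [hcond]
      refine Prod.ext ?_ ?_
      · -- scores
        apply pvDict_ext
        have hLc : (pvAbsS g).contains f = true := by rw [pvAbsS_contains]; exact hc
        have hLg : (pvAbsS g).getD f 0 = pvSumE l := by
          simp [PySem.Dict.getD, pvAbsS_get?, hl]
        show ((pvAbsS g).insert f ((pvAbsS g).getD f 0 + a)).items = _
        rw [hLg]
        have hins : ((pvAbsS g).insert f (pvSumE l + a)).items =
            (pvAbsS g).items.map (fun q => if q.1 == f then (f, pvSumE l + a) else q) := by
          simp [PySem.Dict.insert, hLc]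
        rw [hins, pvAbsS_items, pvAbsS_items, hitems', List.map_map, List.map_map]
        refine List.map_congr_left ?_
        intro p hp
        by_cases hpf : p.1 = f
        · simp [Function.comp, hpf, pvSumE_append]
        · simp [Function.comp, hpf]
      · -- family_best
        by_cases hlt : b.1 < a
        · simp only [hlt, decide_true, if_true]
          apply pvDict_ext
          have hLc : (pvAbsB g).contains f = true := by rw [pvAbsB_contains]; exact hc
          show ((pvAbsB g).insert f m).items = _
          have hins : ((pvAbsB g).insert f m).items =
              (pvAbsB g).items.map (fun q => if q.1 == f then (f, m) else q) := by
            simp [PySem.Dict.insert, hLc]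
          rw [hins, pvAbsB_items, pvAbsB_items, hitems', List.map_map, List.map_map]
          refine List.map_congr_left ?_
          intro p hp
          by_cases hpf : p.1 = f
          · have : pvBsel (l ++ [(a, m)]) = m := by
              simp [pvBsel, pvBest?_append l (a, m) b hb, hlt]
            simp [Function.comp, hpf, this]
          · simp [Function.comp, hpf]
        · simp only [hlt, decide_false]
          apply pvDict_ext
          show (pvAbsB g).items = _
          rw [pvAbsB_items, pvAbsB_items, hitems', List.map_map]
          refine List.map_congr_left ?_
          intro p hp
          by_cases hpf : p.1 = f
          · have h2 : p.2 = l := huniq p hp hpf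
            simp [Function.comp, hpf, h2, pvBsel, hb, pvBest?_append l (a, m) b hb, hlt]
          · simp [Function.comp, hpf]
    · -- invariant preserved
      refine ⟨?_, ?_⟩
      · rw [hg']; exact PySem.Dict.nodup_keys_insert _ _ _ hnd
      · intro p hp
        rw [hitems'] at hp
        obtain ⟨q, hq, rfl⟩ := List.mem_map.mp hp
        by_cases hqf : q.1 = f
        · simp only [hqf, beq_self_eq_true, if_true]
          refine ⟨by simp, ?_⟩
          intro e he
          rcases List.mem_append.mp he with h1 | h1
          · exact hent e h1
          · rcases List.mem_singleton.mp h1 with rfl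
            exact haOf
        · simp only [beq_iff_eq, hqf, if_false]
          exact hslot q hq
  · -- new family
    have hc' : g.contains f = false := by simpa using hc
    have hgetD : g.getD f [] = [] := PySem.Dict.getD_of_not_contains g [] hc'
    have hg' : pvGroupStep g m = g.insert f [(a, m)] := by
      simp only [pvGroupStep, ← hf, ← ha, hgetD, List.nil_append]
    have hitems' : (pvGroupStep g m).items = g.items ++ [(f, [(a, m)])] := by
      rw [hg']; simp [PySem.Dict.insert, hc']
    have hcond : ((!(pvAbsB g).contains f) ||
        decide ((match (pvAbsB g).get? f with
          | some fb => (pvAcc? fb).getD 0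
          | none => 0) < a)) = true := by
      rw [pvAbsB_contains, hc']; rfl
    refine ⟨?_, ?_⟩
    · rw [hcond]
      refine Prod.ext ?_ ?_
      · apply pvDict_ext
        have hLc : (pvAbsS g).contains f = false := by rw [pvAbsS_contains]; exact hc'
        have hLg : (pvAbsS g).getD f 0 = 0 := PySem.Dict.getD_of_not_contains _ 0 hLc
        show ((pvAbsS g).insert f ((pvAbsS g).getD f 0 + a)).items = _
        rw [hLg]
        have hins : ((pvAbsS g).insert f (0 + a)).items = (pvAbsS g).items ++ [(f, 0 + a)] := by
          simp [PySem.Dict.insert, hLc]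
        rw [hins, pvAbsS_items, pvAbsS_items, hitems', List.map_append]
        simp [pvSumE]
      · simp only [if_true]
        apply pvDict_ext
        have hLc : (pvAbsB g).contains f = false := by rw [pvAbsB_contains]; exact hc'
        show ((pvAbsB g).insert f m).items = _
        have hins : ((pvAbsB g).insert f m).items = (pvAbsB g).items ++ [(f, m)] := by
          simp [PySem.Dict.insert, hLc]
        rw [hins, pvAbsB_items, pvAbsB_items, hitems', List.map_append]
        simp [pvBsel, pvBest?_single]
    · refine ⟨?_, ?_⟩
      · rw [hg']; exact PySem.Dict.nodup_keys_insert _ _ _ hnd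
      · intro p hp
        rw [hitems'] at hp
        rcases List.mem_append.mp hp with h1 | h1
        · exact hslot p h1
        · rcases List.mem_singleton.mp h1 with rfl
          exact ⟨by simp, by intro e he; rcases List.mem_singleton.mp he with rfl; exact haOf⟩

theorem pvFold_comm (ms : List (List (String × String)))
    (g : PySem.Dict String (List (Int × List (String × String)))) (h : pvInv g) :
    ms.foldl pvStepA (pvAbsS g, pvAbsB g) =
      (pvAbsS (ms.foldl pvGroupStep g), pvAbsB (ms.foldl pvGroupStep g)) ∧
    pvInv (ms.foldl pvGroupStep g) := by
  induction ms generalizing g with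
  | nil => exact ⟨rfl, h⟩
  | cons m rest ih =>
    obtain ⟨h1, h2⟩ := pvStep_comm g m h
    simpa [List.foldl_cons, h1] using ih (pvGroupStep g m) h2

-- B's selection fold over abstracted (key, total) pairs, related to A's max? over keys
def pvSelStep' (st : Option (Int × String)) (q : String × Int) : Option (Int × String) :=
  match st with
  | none => some (q.2, q.1)
  | some (tt, tf) => if tt < q.2 then some (q.2, q.1) else some (tt, tf)

theorem pvSel_eq_sel' (g : PySem.Dict String (List (Int × List (String × String)))) :
    g.items.foldl pvSelStep none = (pvAbsS g).items.foldl pvSelStep' none := by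
  rw [pvAbsS_items, List.foldl_map]
  rfl

def pvMaxStep (kf : String → Int) (a : Option String) (x : String) : Option String :=
  match a with
  | none => some x
  | some m => if kf m < kf x then some x else some m

theorem pvFoldl_congr {α β : Type} (f g : α → β → α) (xs : List β)
    (h : ∀ a b, f a b = g a b) : ∀ init, xs.foldl f init = xs.foldl g init := by
  induction xs with
  | nil => intro init; rfl
  | cons x t ih => intro init; rw [List.foldl_cons, List.foldl_cons, h]; exact ih _

theorem pvMaxAux (kf : String → Int) (L : List (String × Int)) :
    ∀ (acc : Option (Int × String)),
      (∀ p ∈ L, kf p.1 = p.2) → (∀ t f, acc = some (t, f) → kf f = t) →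
      L.foldl (fun a q => pvMaxStep kf a q.1) (acc.map Prod.snd) =
      (L.foldl pvSelStep' acc).map Prod.snd := by
  induction L with
  | nil => intro acc _ _; rfl
  | cons q rest ih =>
    intro acc hk hacc
    have hq : kf q.1 = q.2 := hk q (by simp)
    have hk' : ∀ p ∈ rest, kf p.1 = p.2 := fun p hp => hk p (by simp [hp])
    cases acc with
    | none =>
      have hstep : pvMaxStep kf ((none : Option (Int × String)).map Prod.snd) q.1 =
          (some ((q.2 : Int), q.1)).map Prod.snd := rfl
      rw [List.foldl_cons, hstep]
      have hstep2 : (q :: rest).foldl pvSelStep' none = rest.foldl pvSelStep' (some (q.2, q.1)) := rfl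
      rw [hstep2]
      exact ih (some (q.2, q.1)) hk' (by
        intro t f h
        simp only [Option.some.injEq, Prod.mk.injEq] at h
        obtain ⟨h1, h2⟩ := h
        rw [← h1, ← h2]
        exact hq)
    | some x =>
      obtain ⟨tt, tf⟩ := x
      have htf : kf tf = tt := hacc tt tf rfl
      by_cases hlt : tt < q.2
      · have hstep : pvMaxStep kf ((some ((tt : Int), tf)).map Prod.snd) q.1 =
            (some ((q.2 : Int), q.1)).map Prod.snd := by
          simp only [Option.map_some, pvMaxStep, htf, hq, if_pos hlt]
        rw [List.foldl_cons, hstep]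
        have hstep2 : (q :: rest).foldl pvSelStep' (some (tt, tf)) =
            rest.foldl pvSelStep' (some (q.2, q.1)) := by
          simp only [List.foldl_cons, pvSelStep', if_pos hlt]
        rw [hstep2]
        exact ih (some (q.2, q.1)) hk' (by
          intro t f h
          simp only [Option.some.injEq, Prod.mk.injEq] at h
          obtain ⟨h1, h2⟩ := h
          rw [← h1, ← h2]
          exact hq)
      · have hstep : pvMaxStep kf ((some ((tt : Int), tf)).map Prod.snd) q.1 =
            (some ((tt : Int), tf)).map Prod.snd := by
          simp only [Option.map_some, pvMaxStep, htf, hq, if_neg hlt]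
        rw [List.foldl_cons, hstep]
        have hstep2 : (q :: rest).foldl pvSelStep' (some (tt, tf)) =
            rest.foldl pvSelStep' (some (tt, tf)) := by
          simp only [List.foldl_cons, pvSelStep', if_neg hlt]
        rw [hstep2]
        exact ih (some (tt, tf)) hk' hacc

theorem pvMax_eq_sel' (kf : String → Int) (L : List (String × Int))
    (hk : ∀ p ∈ L, kf p.1 = p.2) :
    PySem.List.max? (L.map Prod.fst) kf = (L.foldl pvSelStep' none).map Prod.snd := by
  unfold PySem.List.max?
  rw [pvFoldl_congr _ (pvMaxStep kf) (L.map Prod.fst) (by intro a b; cases a <;> rfl) none]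
  rw [List.foldl_map]
  simpa using pvMaxAux kf L none hk (by intro t f h; cases h)

theorem pvSelStep'_isSome (acc : Option (Int × String)) (q : String × Int) :
    (pvSelStep' acc q).isSome = true := by
  cases acc with
  | none => rfl
  | some x => obtain ⟨tt, tf⟩ := x; simp only [pvSelStep']; split <;> rfl

theorem pvSel'_foldSome (L : List (String × Int)) :
    ∀ acc : Option (Int × String), acc.isSome = true →
      (L.foldl pvSelStep' acc).isSome = true := by
  induction L with
  | nil => intro acc h; exact h
  | cons q rest ih => intro acc _; exact ih _ (pvSelStep'_isSome acc q)

theorem pvSel'_isSome (L : List (String × Int)) (hL : L ≠ []) :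
    (L.foldl pvSelStep' none).isSome = true := by
  cases L with
  | nil => exact absurd rfl hL
  | cons q rest => exact pvSel'_foldSome rest _ (pvSelStep'_isSome none q)

theorem pvGroupStep_items_ne (g : PySem.Dict String (List (Int × List (String × String))))
    (m : List (String × String)) : (pvGroupStep g m).items ≠ [] := by
  simp only [pvGroupStep, PySem.Dict.insert]
  split
  · rename_i hco
    intro hnil
    simp only [List.map_eq_nil_iff] at hnil
    rw [PySem.Dict.contains] at hco
    rw [hnil] at hco
    cases hco
  · simp

theorem pvFoldGroup_ne (ms : List (List (String × String)))
    (g : PySem.Dict String (List (Int × List (String × String)))) (h : g.items ≠ []) :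
    (ms.foldl pvGroupStep g).items ≠ [] := by
  induction ms generalizing g with
  | nil => exact h
  | cons m rest ih => exact ih _ (pvGroupStep_items_ne g m)

theorem pvGroups_ne_nil (ms : List (List (String × String))) (hms : ms ≠ []) :
    (ms.foldl pvGroupStep (PySem.Dict.mk [])).items ≠ [] := by
  cases ms with
  | nil => exact absurd rfl hms
  | cons m rest => exact pvFoldGroup_ne rest _ (pvGroupStep_items_ne _ m)

-- ===== VERDICT (by name: the statement is the Claim_ definition above) =====
theorem best_os_guess_py_spec : Claim_equal_best_os_guess_py := by
  intro os _hdom hpre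
  obtain ⟨hne, _h1, _h2⟩ := hpre
  unfold Spec_best_os_guess_py
  cases os with
  | nil => exact absurd rfl hne
  | cons best rest =>
    simp only [best_os_guess_py, best_os_guess_py_alt]
    by_cases h90 : (90 : Int) ≤ (pvAcc? best).getD 0
    · rw [if_pos h90, if_pos h90]
    · rw [if_neg h90, if_neg h90]
      have hInv0 : pvInv (PySem.Dict.mk ([] :
          List (String × List (Int × List (String × String))))) := by
        refine ⟨?_, ?_⟩
        · simp [PySem.Dict.keys]
        · intro p hp; cases hp
      obtain ⟨hfold, hInvG⟩ := pvFold_comm (best :: rest) (PySem.Dict.mk []) hInv0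
      set G := (best :: rest).foldl pvGroupStep (PySem.Dict.mk []) with hG
      have hstA : (best :: rest).foldl pvStepA (PySem.Dict.mk [], PySem.Dict.mk []) =
          (pvAbsS G, pvAbsB G) := hfold
      rw [hstA]
      -- the key function A uses
      have hGne : G.items ≠ [] := pvGroups_ne_nil (best :: rest) (by simp)
      have hSne : (pvAbsS G).items ≠ [] := by
        rw [pvAbsS_items]
        simp only [ne_eq, List.map_eq_nil_iff]
        exact hGne
      have hnodS : (pvAbsS G).keys.Nodup := by rw [pvAbsS_keys]; exact hInvG.1
      have hk : ∀ p ∈ (pvAbsS G).items, (pvAbsS G).getD p.1 0 = p.2 := by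
        intro p hp
        have := PySem.Dict.get?_of_mem_items (pvAbsS G) (k := p.1) (v := p.2)
          (by cases p; exact hp) hnodS
        simp [PySem.Dict.getD, this]
      obtain ⟨x, hselx⟩ := Option.isSome_iff_exists.mp
        (pvSel'_isSome (pvAbsS G).items hSne)
      obtain ⟨t, tf⟩ := x
      have hBsel : G.items.foldl pvSelStep none = some (t, tf) := by
        rw [pvSel_eq_sel']; exact hselx
      have hmax : PySem.List.max? (pvAbsS G).keys (fun f => (pvAbsS G).getD f 0) = some tf := by
        have hkeys : (pvAbsS G).keys = (pvAbsS G).items.map Prod.fst := rfl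
        rw [hkeys, pvMax_eq_sel' _ _ (fun p hp => hk p hp), hselx]
        rfl
      rw [hmax, hBsel]
      simp only [Option.getD_some]
      -- tf is a genuine key of G
      have htfmem : tf ∈ G.keys := by
        rw [← pvAbsS_keys]
        exact PySem.List.max?_mem hmax
      obtain ⟨l, hgl⟩ : ∃ l, G.get? tf = some l := by
        cases hgl : G.get? tf with
        | none => exact absurd ((PySem.Dict.get?_eq_none_iff_not_mem_keys G tf).mp hgl) (by simp [htfmem])
        | some l => exact ⟨l, rfl⟩
      have hmemG : (tf, l) ∈ G.items := pv_mem_of_get? G hgl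
      obtain ⟨hlne, hent⟩ := hInvG.2 _ hmemG
      obtain ⟨b, hb⟩ : ∃ b, pvBest? l = some b := by
        cases hbb : pvBest? l with
        | none => exact absurd ((PySem.List.max?_eq_none_iff _ _).mp hbb) hlne
        | some b => exact ⟨b, rfl⟩
      obtain ⟨b1, b2⟩ := b
      have hbacc : b1 = pvAccOf b2 := hent (b1, b2) (PySem.List.max?_mem hb)
      have hgetD : G.getD tf [] = l := by simp [PySem.Dict.getD, hgl]
      have hBmax : PySem.List.max? (G.getD tf []) (fun e => e.1) = some (b1, b2) := by
        rw [hgetD]; exact hb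
      rw [hBmax]
      have htm : ((pvAbsB G).get? tf).getD [] = b2 := by
        rw [pvAbsB_get?, hgl]
        simp [pvBsel, hb]
      rw [htm]
      have hacc2 : (pvAcc? b2).getD 0 = b1 := hbacc.symm
      rw [hacc2]
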